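-- pv_equiv track=rewrite | github.com/Aelita-S/infercode | infercode/data_utils/tensor_util.py | _pad_batch_4D
-- ===== SOURCE A (Python) =====
-- def _pad_batch_4D(batch):
--     max_2nd_D = max([len(x) for x in batch])
--     max_3rd_D = max([len(c) for n in batch for c in n])
--     max_4th_D = max([len(s) for n in batch for c in n for s in c])
--     batch = [n + ([[]] * (max_2nd_D - len(n))) for n in batch]
--     batch = [[c + ([[]] * (max_3rd_D - len(c))) for c in sample] for sample in batch]
--     batch = [[[s + [0] * (max_4th_D - len(s)) for s in c] for c in sample] for sample in batch]
--     return batch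
-- ===== SOURCE B (Python) =====
-- def _pad_batch_4D(batch):
--     # One sweep accumulates all three target dims; then each padded row/plane is
--     # built directly at full size, instead of A's three whole-batch padding passes.
--     d2 = d3 = d4 = 0
--     for n in batch:
--         if len(n) > d2:
--             d2 = len(n)
--         for c in n:
--             if len(c) > d3:
--                 d3 = len(c)
--             for s in c:
--                 if len(s) > d4:
--                     d4 = len(s)
--     out = []
--     for n in batch:
--         sample = [[s + [0] * (d4 - len(s)) for s in c]
--                   + [[0] * d4 for _ in range(d3 - len(c))] for c in n]
--         sample += [[[0] * d4 for _ in range(d3)] for _ in range(d2 - len(n))]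
--         out.append(sample)
--     return out
-- ===== Notes on version B (the rewrite author's own statement) =====
-- stated objective: alternative
-- what changed: B replaces A's three list-comprehension max() scans and three successive whole-batch padding passes by one imperative sweep that accumulates all three target dims in a running triple, followed by a single build that emits each padded row and each filler plane directly at full size (no intermediate half-padded batches).
import Mathlib
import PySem

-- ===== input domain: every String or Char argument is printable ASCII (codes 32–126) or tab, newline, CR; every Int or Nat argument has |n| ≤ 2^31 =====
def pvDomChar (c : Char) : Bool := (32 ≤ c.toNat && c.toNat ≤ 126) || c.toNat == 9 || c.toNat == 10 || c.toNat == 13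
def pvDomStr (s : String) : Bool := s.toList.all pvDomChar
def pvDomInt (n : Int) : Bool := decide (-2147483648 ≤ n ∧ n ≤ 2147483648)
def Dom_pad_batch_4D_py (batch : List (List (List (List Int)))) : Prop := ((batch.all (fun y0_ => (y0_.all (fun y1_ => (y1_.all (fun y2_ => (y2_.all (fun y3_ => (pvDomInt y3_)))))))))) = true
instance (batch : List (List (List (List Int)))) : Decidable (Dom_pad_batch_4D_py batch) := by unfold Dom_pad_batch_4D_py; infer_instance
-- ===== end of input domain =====

-- B accumulates the three target dims in one sweep and builds each padded row/filler plane
-- directly at full size, instead of A's three max() scans plus three whole-batch padding passes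
-- (objective: alternative decomposition).

-- ===== PORT A =====
-- max([...]) with no key is PySem.List.max? with identity key; none = ValueError (excluded by Pre_)
def pad_batch_4D_py (batch : List (List (List (List Int)))) : List (List (List (List Int))) :=
  match PySem.List.max? (batch.map (fun x => x.length)) (fun y => y),
        PySem.List.max? ((batch.flatMap (fun n => n)).map (fun c => c.length)) (fun y => y),
        PySem.List.max? (((batch.flatMap (fun n => n)).flatMap (fun c => c)).map (fun s => s.length)) (fun y => y) with
  | some max2, some max3, some max4 =>
    let b1 := batch.map (fun n => n ++ List.replicate (max2 - n.length) []);
    let b2 := b1.map (fun sample => sample.map (fun c => c ++ List.replicate (max3 - c.length) []));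
    let b3 := b2.map (fun sample => sample.map (fun c => c.map (fun s => s ++ List.replicate (max4 - s.length) (0 : Int))));
    b3
  | _, _, _ => []   -- Python raises ValueError here; outside Pre_

-- ===== PORT B =====
-- one sweep accumulating (d2, d3, d4); `if len > d then len else d` as in Source B
def pad_batch_4D_py_alt (batch : List (List (List (List Int)))) : List (List (List (List Int))) :=
  let dims : Nat × Nat × Nat :=
    batch.foldl (fun acc n =>
      n.foldl (fun acc c =>
          c.foldl (fun acc s =>
              (acc.1, acc.2.1, if s.length > acc.2.2 then s.length else acc.2.2))
            (acc.1, if c.length > acc.2.1 then c.length else acc.2.1, acc.2.2))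
        (if n.length > acc.1 then n.length else acc.1, acc.2.1, acc.2.2))
      (0, 0, 0)
  let d2 := dims.1; let d3 := dims.2.1; let d4 := dims.2.2
  batch.map (fun n =>
    n.map (fun c =>
      c.map (fun s => s ++ List.replicate (d4 - s.length) (0 : Int))
      ++ (List.range (d3 - c.length)).map (fun _ => List.replicate d4 (0 : Int)))
    ++ (List.range (d2 - n.length)).map (fun _ =>
         (List.range d3).map (fun _ => List.replicate d4 (0 : Int))))

-- ===== PRECONDITION & SPEC =====
-- Pre_ excludes exactly the inputs on which A raises ValueError (an empty max() argument at some level).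
def Pre_pad_batch_4D_py (batch : List (List (List (List Int)))) : Prop :=
  batch ≠ [] ∧ (batch.flatMap (fun n => n)) ≠ [] ∧ ((batch.flatMap (fun n => n)).flatMap (fun c => c)) ≠ []
instance (batch : List (List (List (List Int)))) : Decidable (Pre_pad_batch_4D_py batch) := by unfold Pre_pad_batch_4D_py; infer_instance
def pvWitness_pad_batch_4D_py : List (List (List (List Int))) := [[[[1]]]]

def Spec_pad_batch_4D_py (batch : List (List (List (List Int)))) (out : List (List (List (List Int)))) : Prop := out = pad_batch_4D_py_alt batch
instance (batch : List (List (List (List Int)))) (out : List (List (List (List Int)))) : Decidable (Spec_pad_batch_4D_py batch out) := by unfold Spec_pad_batch_4D_py; infer_instance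

-- ===== CLAIM (what is proved, stated in full; the proofs are below) =====
def Claim_equal_pad_batch_4D_py : Prop := ∀ (batch : List (List (List (List Int)))), Dom_pad_batch_4D_py batch → Pre_pad_batch_4D_py batch → Spec_pad_batch_4D_py batch (pad_batch_4D_py batch)

-- ===== LEMMAS AND PROOFS =====

lemma ite_gt_max (x d : Nat) : (if x > d then x else d) = max d x := by
  split <;> omega

-- the innermost fold of B's sweep only touches the third component, as a running max
lemma fold4_eq (c : List (List Int)) (a b d : Nat) :
    c.foldl (fun acc s => (acc.1, acc.2.1, max acc.2.2 s.length)) ((a, b, d) : Nat × Nat × Nat)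
    = (a, b, (c.map (fun s => s.length)).foldl max d) := by
  induction c generalizing d with
  | nil => rfl
  | cons s t ih => simp only [List.foldl_cons, List.map_cons, ih]

lemma fold3_eq (n : List (List (List Int))) (a b d : Nat) :
    n.foldl (fun acc c =>
        c.foldl (fun acc s => (acc.1, acc.2.1, max acc.2.2 s.length))
          (acc.1, max acc.2.1 c.length, acc.2.2))
      ((a, b, d) : Nat × Nat × Nat)
    = (a, (n.map (fun c => c.length)).foldl max b,
        ((n.flatMap (fun c => c)).map (fun s => s.length)).foldl max d) := by
  induction n generalizing b d with
  | nil => rfl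
  | cons c t ih =>
      rw [List.foldl_cons, fold4_eq, ih]
      simp only [List.map_cons, List.foldl_cons, List.flatMap_cons, List.map_append,
        List.foldl_append]

lemma fold2_eq (batch : List (List (List (List Int)))) (a b d : Nat) :
    batch.foldl (fun acc n =>
      n.foldl (fun acc c =>
          c.foldl (fun acc s => (acc.1, acc.2.1, max acc.2.2 s.length))
            (acc.1, max acc.2.1 c.length, acc.2.2))
        (max acc.1 n.length, acc.2.1, acc.2.2))
      ((a, b, d) : Nat × Nat × Nat)
    = ((batch.map (fun x => x.length)).foldl max a,
       ((batch.flatMap (fun n => n)).map (fun c => c.length)).foldl max b,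
       (((batch.flatMap (fun n => n)).flatMap (fun c => c)).map (fun s => s.length)).foldl max d) := by
  induction batch generalizing a b d with
  | nil => rfl
  | cons n t ih =>
      rw [List.foldl_cons, fold3_eq, ih]
      simp only [List.map_cons, List.foldl_cons, List.flatMap_cons, List.map_append,
        List.flatMap_append, List.foldl_append]

-- Python's max of a nonempty Nat list is the running max from 0
lemma max?_eq_foldl (l : List Nat) (h : l ≠ []) :
    PySem.List.max? l (fun y => y) = some (l.foldl max 0) := by
  cases l with
  | nil => exact absurd rfl h
  | cons x t =>
      rw [PySem.List.max?_id_cons]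
      simp

-- ===== VERDICT (by name: the statement is the Claim_ definition above) =====
theorem pad_batch_4D_py_spec : Claim_equal_pad_batch_4D_py := by
  intro batch _ hpre
  obtain ⟨h1, h2, h3⟩ := hpre
  unfold Spec_pad_batch_4D_py pad_batch_4D_py pad_batch_4D_py_alt
  rw [max?_eq_foldl _ (fun e => h1 (List.map_eq_nil_iff.mp e)),
      max?_eq_foldl _ (fun e => h2 (List.map_eq_nil_iff.mp e)),
      max?_eq_foldl _ (fun e => h3 (List.map_eq_nil_iff.mp e))]
  simp only [ite_gt_max, fold2_eq]
  simp only [List.map_map]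
  apply List.map_congr_left
  intro n _
  simp only [Function.comp, List.map_append, List.map_map, List.map_replicate,
    List.map_const', List.length_range, List.nil_append,
    Nat.sub_zero, List.length_nil]
  congr 1
  apply List.map_congr_left
  intro c _
  simp [List.map_append, List.map_replicate]
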